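-- pv_equiv track=rewrite | github.com/pineskyeo/bijection | bijection/lexers/code_lexer.py | _is_transformable
-- ===== SOURCE A (Python) =====
-- from typing import List, Set
--
-- _NON_TRANSFORM_NAME_PREFIXES = (
--     "Token.Name.Builtin",
--     "Token.Name.Exception",
--     "Token.Name.Namespace",
--     "Token.Name.Decorator",
--     "Token.Name.Label",
--     "Token.Name.Entity",
--     "Token.Name.Attribute",  # XML/HTML attributes
--     "Token.Name.Tag",        # XML/HTML tags
-- )
--
-- def _is_name_type(ttype_s: str) -> bool:
--     return ttype_s == "Token.Name" or ttype_s.startswith("Token.Name.")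
--
-- def _is_transformable(ttype_s: str, value: str, extra: Set[str]) -> bool:
--     """Return True if this token should be treated as a transformable IDENTIFIER."""
--     if not _is_name_type(ttype_s):
--         return False
--
--     # Exclude specific Name sub-hierarchies
--     for prefix in _NON_TRANSFORM_NAME_PREFIXES:
--         if ttype_s == prefix or ttype_s.startswith(prefix + "."):
--             return False
--
--     # Exclude language-specific builtins
--     if value in extra:
--         return False
--
--     # Must be a valid identifier
--     if not value or not value.isidentifier():
--         return False
--
--     # Exclude dunder names
--     if value.startswith("__") and value.endswith("__"):
--         return False
--
--     return True
-- ===== SOURCE B (Python) =====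
-- _EXCLUDED_SUBCATS = {"Builtin", "Exception", "Namespace", "Decorator",
--                      "Label", "Entity", "Attribute", "Tag"}
--
-- def _is_transformable(ttype_s, value, extra):
--     # Tokenize the type string into its dot-separated components once, then
--     # decide everything with a single boolean expression over the components.
--     parts = ttype_s.split('.')
--     return (len(parts) >= 2 and parts[0] == "Token" and parts[1] == "Name"
--             and (len(parts) == 2 or parts[2] not in _EXCLUDED_SUBCATS)
--             and value not in extra
--             and value.isidentifier()
--             and not (value.startswith("__") and value.endswith("__")))
-- ===== Notes on version B (the rewrite author's own statement) =====
-- stated objective: simpler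
-- what changed: B tokenizes the type string once with split('.') and decides everything by a single boolean expression over the component list (first two components must be ['Token','Name'], third component not in a set of excluded subcategory names), replacing A's loop of 8 equality/startswith prefix tests and its chain of early returns.
import Mathlib
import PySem

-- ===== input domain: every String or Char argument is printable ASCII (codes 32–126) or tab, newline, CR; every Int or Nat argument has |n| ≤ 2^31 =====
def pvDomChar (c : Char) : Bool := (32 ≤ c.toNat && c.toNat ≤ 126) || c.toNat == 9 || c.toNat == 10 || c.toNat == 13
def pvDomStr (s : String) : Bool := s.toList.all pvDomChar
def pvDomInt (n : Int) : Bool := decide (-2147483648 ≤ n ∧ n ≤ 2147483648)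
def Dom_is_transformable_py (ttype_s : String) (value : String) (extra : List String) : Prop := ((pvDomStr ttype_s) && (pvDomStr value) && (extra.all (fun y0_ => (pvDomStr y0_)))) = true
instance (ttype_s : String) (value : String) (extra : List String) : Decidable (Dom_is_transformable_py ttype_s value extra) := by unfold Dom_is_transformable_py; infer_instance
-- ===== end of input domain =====

-- B tokenizes the type string into its dot-separated components once and decides
-- everything by one boolean expression over that list, instead of A's loop of 8
-- prefix/equality tests and early returns (objective: simpler).

-- ===== PORT A =====
-- hand port of str.isidentifier, exact on the ASCII domain
def pyIsIdentAscii (v : String) : Bool :=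
  match v.toList with
  | [] => false
  | c :: cs => (PySem.Chars.isalpha c || c == '_') && cs.all (fun d => PySem.Chars.isalnum d || d == '_')

def nonTransformNamePrefixes : List String :=
  ["Token.Name.Builtin", "Token.Name.Exception", "Token.Name.Namespace",
   "Token.Name.Decorator", "Token.Name.Label", "Token.Name.Entity",
   "Token.Name.Attribute", "Token.Name.Tag"]

def isNameType (ttype_s : String) : Bool :=
  ttype_s == "Token.Name" || PySem.Str.startswith ttype_s "Token.Name."

def is_transformable_py (ttype_s : String) (value : String) (extra : List String) : Bool :=
  if !(isNameType ttype_s) then false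
  -- the for-loop with early return, as .any over the tuple
  else if nonTransformNamePrefixes.any
      (fun p => ttype_s == p || PySem.Str.startswith ttype_s (p ++ ".")) then false
  else if extra.contains value then false
  else if value == "" || !(pyIsIdentAscii value) then false
  else if PySem.Str.startswith value "__" && PySem.Str.endswith value "__" then false
  else true

-- ===== PORT B =====
def excludedSubcats : PySem.Set String :=
  PySem.Set.ofList ["Builtin", "Exception", "Namespace", "Decorator",
                    "Label", "Entity", "Attribute", "Tag"]

def is_transformable_py_alt (ttype_s : String) (value : String) (extra : List String) : Bool :=
  -- parts = ttype_s.split('.')  (indexing is guarded by the length tests, so getD is exact)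
  let parts := (PySem.Chars.splitOn ttype_s.toList ['.']).map String.ofList
  decide (2 ≤ parts.length) && (parts.getD 0 "" == "Token") && (parts.getD 1 "" == "Name")
    && (decide (parts.length = 2) || !(PySem.Set.contains excludedSubcats (parts.getD 2 "")))
    && !(extra.contains value)
    && pyIsIdentAscii value
    && !(PySem.Str.startswith value "__" && PySem.Str.endswith value "__")

-- ===== PRECONDITION & SPEC =====
def Spec_is_transformable_py (ttype_s : String) (value : String) (extra : List String) (out : Bool) : Prop := out = is_transformable_py_alt ttype_s value extra
instance (ttype_s : String) (value : String) (extra : List String) (out : Bool) : Decidable (Spec_is_transformable_py ttype_s value extra out) := by unfold Spec_is_transformable_py; infer_instance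

-- ===== CLAIM (what is proved, stated in full; the proofs are below) =====
def Claim_equal_is_transformable_py : Prop := ∀ (ttype_s : String) (value : String) (extra : List String), Dom_is_transformable_py ttype_s value extra → Spec_is_transformable_py ttype_s value extra (is_transformable_py ttype_s value extra)

-- ===== LEMMAS AND PROOFS =====

-- reference splitter on '.' (structural recursion; always nonempty)
def dotSplit : List Char → List (List Char)
  | [] => [[]]
  | c :: rest =>
      let ps := dotSplit rest
      if c = '.' then [] :: ps else (c :: ps.headD []) :: ps.tail

lemma dotSplit_cons (c : Char) (rest : List Char) :
    dotSplit (c :: rest) = if c = '.' then [] :: dotSplit rest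
      else (c :: (dotSplit rest).headD []) :: (dotSplit rest).tail := rfl

lemma dotSplit_ne_nil (l : List Char) : dotSplit l ≠ [] := by
  cases l with
  | nil => simp [dotSplit]
  | cons c rest => rw [dotSplit_cons]; split_ifs <;> simp

lemma go_dot (fuel : Nat) (l cur : List Char) (acc : List (List Char)) (h : l.length < fuel) :
    PySem.Chars.splitOn.go ['.'] fuel l cur acc
      = acc.reverse ++ (dotSplit l).modifyHead (cur.reverse ++ ·) := by
  induction fuel generalizing l cur acc with
  | zero => omega
  | succ f ih =>
    cases l with
    | nil =>
      rw [PySem.Chars.splitOn.go.eq_def]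
      simp [dotSplit]
    | cons c rest =>
      rw [PySem.Chars.splitOn.go.eq_def]
      simp only []
      by_cases hc : c = '.'
      · subst hc
        rw [if_pos (by simp)]
        rw [show List.drop (['.'] : List Char).length ('.' :: rest) = rest from rfl]
        rw [ih rest [] _ (by simpa using Nat.lt_of_succ_lt_succ h)]
        obtain ⟨p, ps, hp⟩ := List.exists_cons_of_ne_nil (dotSplit_ne_nil rest)
        simp [dotSplit_cons, hp]
      · have hnp : (['.'].isPrefixOf (c :: rest)) = false := by
          rw [show (['.'].isPrefixOf (c :: rest)) = (('.' == c) && [].isPrefixOf rest) from rfl]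
          simp [Ne.symm hc]
        rw [if_neg (by simp [hnp])]
        rw [ih rest (c :: cur) acc (by simpa using Nat.lt_of_succ_lt_succ h)]
        rw [dotSplit_cons, if_neg hc]
        obtain ⟨p, ps, hp⟩ := List.exists_cons_of_ne_nil (dotSplit_ne_nil rest)
        simp [hp]

lemma splitOn_eq_dotSplit (l : List Char) : PySem.Chars.splitOn l ['.'] = dotSplit l := by
  unfold PySem.Chars.splitOn
  rw [go_dot _ _ _ _ (by omega)]
  obtain ⟨p, ps, hp⟩ := List.exists_cons_of_ne_nil (dotSplit_ne_nil l)
  simp [hp]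

-- splitting a string that begins with the dot-free word w followed by '.'
lemma dotSplit_word_cons (w l : List Char) (hw : '.' ∉ w) :
    dotSplit (w ++ '.' :: l) = w :: dotSplit l := by
  induction w with
  | nil => simp [dotSplit]
  | cons a w' ih =>
    have ha : a ≠ '.' := fun h => hw (h ▸ List.mem_cons_self ..)
    have hw' : '.' ∉ w' := fun h => hw (List.mem_cons_of_mem _ h)
    rw [List.cons_append, dotSplit_cons, if_neg ha, ih hw']
    simp

lemma headD_dotSplit (l : List Char) :
    (dotSplit l).headD [] = l.takeWhile (fun c => !(c == '.')) := by
  induction l with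
  | nil => simp [dotSplit]
  | cons c rest ih =>
    rw [dotSplit_cons]
    by_cases hc : c = '.'
    · subst hc; simp
    · rw [if_neg hc, List.headD_cons, ih, List.takeWhile_cons, if_pos (by simp [hc])]

-- rejoining the components recovers the string
def joinDots : List (List Char) → List Char
  | [] => []
  | [p] => p
  | p :: q :: ps => p ++ '.' :: joinDots (q :: ps)

lemma joinDots_dotSplit (l : List Char) : joinDots (dotSplit l) = l := by
  induction l with
  | nil => simp [dotSplit, joinDots]
  | cons c rest ih =>
    rw [dotSplit_cons]
    obtain ⟨p, ps, hp⟩ := List.exists_cons_of_ne_nil (dotSplit_ne_nil rest)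
    by_cases hc : c = '.'
    · subst hc
      rw [if_pos rfl, hp, joinDots, ← hp, ih]
      rfl
    · rw [if_neg hc, hp]
      simp only [List.headD_cons, List.tail_cons]
      have : joinDots ((c :: p) :: ps) = c :: joinDots (p :: ps) := by
        cases ps <;> simp [joinDots]
      rw [this, ← hp, ih]

-- "equal to the dot-free word w, or extends it past a dot" ↔ "first dot-component is w"
lemma takeWhile_dot_iff (r w : List Char) (hw : '.' ∉ w) :
    (r = w ∨ (w ++ ['.']) <+: r) ↔ r.takeWhile (fun c => !(c == '.')) = w := by
  induction r generalizing w with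
  | nil => cases w <;> simp
  | cons c r' ih =>
    by_cases hc : c = '.'
    · subst hc
      rw [List.takeWhile_cons_of_neg (by simp)]
      cases w with
      | nil => simp [List.cons_prefix_cons]
      | cons a w' =>
        have ha : a ≠ '.' := fun h => hw (h ▸ List.mem_cons_self ..)
        constructor
        · rintro (h | h)
          · injection h with h1 _; exact absurd h1.symm ha
          · rw [List.cons_append, List.cons_prefix_cons] at h
            exact absurd h.1 ha
        · intro h; exact absurd h.symm (by simp)
    · have hp : (!(c == '.')) = true := by simp [hc]
      rw [List.takeWhile_cons, if_pos hp]
      cases w with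
      | nil =>
        have h1 : ¬ ('.' = c) := fun h => hc h.symm
        simp [List.cons_prefix_cons, h1]
      | cons a w' =>
        have hw' : '.' ∉ w' := fun h => hw (List.mem_cons_of_mem _ h)
        simp only [List.cons_append, List.cons_prefix_cons, List.cons.injEq]
        constructor
        · rintro (⟨h1, h2⟩ | ⟨h1, h2⟩)
          · exact ⟨h1, (ih w' hw').mp (Or.inl h2)⟩
          · exact ⟨h1.symm, (ih w' hw').mp (Or.inr h2)⟩
        · rintro ⟨h1, h2⟩
          rcases (ih w' hw').mpr h2 with h | h
          · exact Or.inl ⟨h1, h⟩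
          · exact Or.inr ⟨h1.symm, h⟩

-- one prefix of A's tuple against one excluded subcategory name
lemma prefix_case (t pfull w : String) (r : List Char)
    (hpf : pfull = "Token.Name." ++ w)
    (hr : t.toList = "Token.Name.".toList ++ r) (hw : '.' ∉ w.toList) :
    ((t == pfull) || PySem.Str.startswith t (pfull ++ ".")) =
      decide (r.takeWhile (fun c => !(c == '.')) = w.toList) := by
  subst hpf
  have h1 : (t == ("Token.Name." ++ w)) = decide (r = w.toList) := by
    rw [Bool.eq_iff_iff]
    simp only [beq_iff_eq, decide_eq_true_eq]
    rw [← String.toList_inj, String.toList_append, hr]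
    exact iff_of_eq (List.append_cancel_left_eq _ _ _)
  have h2 : PySem.Str.startswith t (("Token.Name." ++ w) ++ ".") =
      decide ((w.toList ++ ['.']) <+: r) := by
    rw [PySem.Str.startswith_eq, Bool.eq_iff_iff, PySem.Chars.startswith_iff]
    simp only [String.toList_append, decide_eq_true_eq, hr]
    rw [List.append_assoc]
    exact List.prefix_append_right_inj _
  rw [h1, h2, ← Bool.decide_or, decide_eq_decide]
  exact takeWhile_dot_iff r w.toList hw

-- A's tail (three early returns) equals B's conjunction of value checks
lemma tail_eq (v : String) (e : List String) :
    (if e.contains v then false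
     else if v == "" || !(pyIsIdentAscii v) then false
     else if PySem.Str.startswith v "__" && PySem.Str.endswith v "__" then false
     else true)
    = (!(e.contains v) && pyIsIdentAscii v
        && !(PySem.Str.startswith v "__" && PySem.Str.endswith v "__")) := by
  by_cases hc : e.contains v
  · have hm : v ∈ e := by simpa using hc
    simp [hm]
  · by_cases hv : v = ""
    · subst hv
      simp [hc, show pyIsIdentAscii "" = false from rfl]
    · have hvb : (v == "") = false := by simpa using hv
      cases hid : pyIsIdentAscii v <;>
        cases hdd : PySem.Str.startswith v "__" && PySem.Str.endswith v "__" <;>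
          simp [hc, hvb, hid, hdd]

-- A's prefix loop over a type "Token.Name." ++ r equals B's membership test on the
-- first dot-component of r
lemma cat_eq (t : String) (r : List Char)
    (hr : t.toList = "Token.Name.".toList ++ r) :
    (nonTransformNamePrefixes.any fun p => (t == p) || PySem.Str.startswith t (p ++ ".")) =
    PySem.Set.contains excludedSubcats
      (String.ofList (r.takeWhile (fun c => !(c == '.')))) := by
  have key : ∀ w : String, (String.ofList (r.takeWhile (fun c => !(c == '.'))) == w) =
      decide (r.takeWhile (fun c => !(c == '.')) = w.toList) := by
    intro w
    rw [Bool.eq_iff_iff, beq_iff_eq, decide_eq_true_iff, ← String.toList_inj]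
    simp
  rw [show excludedSubcats = ["Builtin", "Exception", "Namespace", "Decorator",
        "Label", "Entity", "Attribute", "Tag"] from by decide]
  simp only [nonTransformNamePrefixes, List.any_cons, List.any_nil, Bool.or_false,
    PySem.Set.contains, List.contains_cons, List.contains_nil, Bool.or_false]
  rw [prefix_case t _ "Builtin" r (by decide) hr (by decide),
      prefix_case t _ "Exception" r (by decide) hr (by decide),
      prefix_case t _ "Namespace" r (by decide) hr (by decide),
      prefix_case t _ "Decorator" r (by decide) hr (by decide),
      prefix_case t _ "Label" r (by decide) hr (by decide),
      prefix_case t _ "Entity" r (by decide) hr (by decide),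
      prefix_case t _ "Attribute" r (by decide) hr (by decide),
      prefix_case t _ "Tag" r (by decide) hr (by decide)]
  simp only [key]

lemma main_eq (ttype_s value : String) (extra : List String) :
    is_transformable_py ttype_s value extra = is_transformable_py_alt ttype_s value extra := by
  unfold is_transformable_py is_transformable_py_alt isNameType
  rw [splitOn_eq_dotSplit]
  by_cases ht : ttype_s = "Token.Name"
  · subst ht
    rw [if_neg (show ¬((!((("Token.Name" : String) == "Token.Name")
          || PySem.Str.startswith "Token.Name" "Token.Name.")) = true) from by decide),
        if_neg (show ¬((nonTransformNamePrefixes.any fun p =>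
          (("Token.Name" : String) == p)
          || PySem.Str.startswith "Token.Name" (p ++ ".")) = true) from by decide),
        tail_eq,
        show dotSplit "Token.Name".toList = ["Token".toList, "Name".toList] from rfl]
    simp
  · have hbe : (ttype_s == "Token.Name") = false := by simpa using ht
    by_cases hs : PySem.Str.startswith ttype_s "Token.Name." = true
    · have hsc : PySem.Chars.startswith ttype_s.toList "Token.Name.".toList = true := by
        simpa using hs
      obtain ⟨r, hr0⟩ := (PySem.Chars.startswith_iff _ _).mp hsc
      have hr : ttype_s.toList = "Token.Name.".toList ++ r := hr0.symm
      have hsplit : dotSplit ttype_s.toList = "Token".toList :: "Name".toList :: dotSplit r := by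
        rw [hr,
            show ("Token.Name.".toList ++ r) = "Token".toList ++ '.' :: ("Name".toList ++ '.' :: r)
              from rfl,
            dotSplit_word_cons _ _ (by decide), dotSplit_word_cons _ _ (by decide)]
      obtain ⟨q, qs, hq⟩ := List.exists_cons_of_ne_nil (dotSplit_ne_nil r)
      have hqhead : q = r.takeWhile (fun c => !(c == '.')) := by
        have := headD_dotSplit r; rw [hq] at this; simpa using this
      rw [if_neg (show ¬((!((ttype_s == "Token.Name")
            || PySem.Str.startswith ttype_s "Token.Name.")) = true) by rw [hbe, hs]; decide),
          tail_eq, hsplit, hq]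
      rw [cat_eq ttype_s r hr]
      simp only [List.map_cons, List.length_cons, List.getD_cons_zero, List.getD_cons_succ]
      rw [← hqhead]
      cases hx : excludedSubcats.contains (String.ofList q) <;>
        simp [hx, show ¬((List.map String.ofList qs).length + 1 + 1 + 1 = 2) from by omega,
              show 2 ≤ (List.map String.ofList qs).length + 1 + 1 + 1 from by omega]
    · have hs' : PySem.Str.startswith ttype_s "Token.Name." = false := by
        simpa using hs
      rw [if_pos (show (!((ttype_s == "Token.Name")
            || PySem.Str.startswith ttype_s "Token.Name.")) = true by rw [hbe, hs']; decide)]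
      -- B's component guard must fail: otherwise rejoining the components would make
      -- ttype_s equal to "Token.Name" or start with "Token.Name."
      have hguard : ∀ rest, dotSplit ttype_s.toList ≠ "Token".toList :: "Name".toList :: rest := by
        intro rest hcon
        have hj := joinDots_dotSplit ttype_s.toList
        rw [hcon] at hj
        cases rest with
        | nil =>
          apply ht
          rw [← String.toList_inj, ← hj]
          rfl
        | cons p ps =>
          have : PySem.Chars.startswith ttype_s.toList "Token.Name.".toList = true := by
            rw [PySem.Chars.startswith_iff, ← hj]
            exact ⟨joinDots (p :: ps), by simp [joinDots]⟩
          rw [PySem.Str.startswith_eq] at hs'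
          rw [hs'] at this
          exact absurd this (by decide)
      obtain ⟨p, ps, hp⟩ := List.exists_cons_of_ne_nil (dotSplit_ne_nil ttype_s.toList)
      cases ps with
      | nil =>
        rw [hp]
        simp
      | cons p1 ps1 =>
        rw [hp]
        by_cases h0 : p = "Token".toList
        · have h1 : p1 ≠ "Name".toList := by
            intro h1; exact hguard ps1 (by rw [hp, h0, h1])
          have : (String.ofList p1 == "Name") = false := by
            simp only [beq_eq_false_iff_ne, ne_eq]
            intro hcon
            exact h1 (by simpa using congrArg String.toList hcon)
          simp [this]
        · have : (String.ofList p == "Token") = false := by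
            simp only [beq_eq_false_iff_ne, ne_eq]
            intro hcon
            exact h0 (by simpa using congrArg String.toList hcon)
          simp [this]

-- ===== VERDICT (by name: the statement is the Claim_ definition above) =====
theorem is_transformable_py_spec : Claim_equal_is_transformable_py := by
  intro ttype_s value extra _
  unfold Spec_is_transformable_py
  exact main_eq ttype_s value extra
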